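-- pv_equiv track=rewrite | github.com/jtunny164/cdigits | num_puzzle3a.py | meets_constraints
-- ===== SOURCE A (Python) =====
-- def meets_constraints(digits, debug=False):
--     test_val = 0
--     power = 0
--     pos = 1
--     for dig in digits:
--         test_val = test_val * 10 + dig
--         power += 1
--         if ((test_val % pos) != 0):
--             return False        # give up at first failure
--         pos += 1
--     return True
-- ===== SOURCE B (Python) =====
-- def meets_constraints(digits, debug=False):
--     # Brute force: recompute each length-k prefix's value from scratch and
--     # test it against k, instead of A's incremental accumulator with early exit.
--     def prefix_value(xs):
--         val = 0
--         for d in xs: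
--             val = val * 10 + d
--         return val
--     return all(prefix_value(digits[:k]) % k == 0
--                for k in range(1, len(digits) + 1))
-- ===== Notes on version B (the rewrite author's own statement) =====
-- stated objective: alternative
-- what changed: Replaces A's single-pass incremental accumulator with early exit by a brute-force check: for each k it recomputes the length-k prefix value from scratch from digits[:k] and tests all of them with all().
import Mathlib
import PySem

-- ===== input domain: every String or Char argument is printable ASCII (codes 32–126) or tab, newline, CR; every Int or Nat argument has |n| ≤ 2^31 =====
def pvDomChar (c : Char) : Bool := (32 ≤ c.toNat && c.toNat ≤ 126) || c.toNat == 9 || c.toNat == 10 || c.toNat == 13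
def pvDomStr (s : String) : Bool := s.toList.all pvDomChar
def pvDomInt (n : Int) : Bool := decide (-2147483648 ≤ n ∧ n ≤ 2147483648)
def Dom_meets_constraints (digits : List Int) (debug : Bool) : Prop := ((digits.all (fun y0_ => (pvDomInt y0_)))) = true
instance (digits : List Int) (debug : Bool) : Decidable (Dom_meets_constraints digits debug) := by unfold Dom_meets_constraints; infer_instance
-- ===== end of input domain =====

-- B replaces A's incremental accumulator with early exit by a brute-force check of every prefix recomputed from scratch; objective: alternative.

-- ===== PORT A =====
-- A's loop: state (test_val, power, pos); early `return False` becomes returning false.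
def mcLoopA : List Int → Int → Int → Int → Bool
  | [], _, _, _ => true
  | dig :: rest, test_val, power, pos =>
    let test_val' := test_val * 10 + dig
    let power' := power + 1
    if PySem.Int.mod test_val' pos ≠ 0 then false
    else mcLoopA rest test_val' power' (pos + 1)

def meets_constraints (digits : List Int) (debug : Bool) : Bool :=
  mcLoopA digits 0 0 1

-- ===== PORT B =====
-- B's helper prefix_value: Horner fold over a prefix slice.
def mcPrefixValue : List Int → Int → Int
  | [], val => val
  | d :: rest, val => mcPrefixValue rest (val * 10 + d)

-- all(prefix_value(digits[:k]) % k == 0 for k in range(1, len(digits)+1))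
def meets_constraints_alt (digits : List Int) (debug : Bool) : Bool :=
  (PySem.List.pyRange 1 ((digits.length : Int) + 1) 1).all
    (fun k => PySem.Int.mod (mcPrefixValue (PySem.List.slice digits none (some k)) 0) k == 0)

-- ===== PRECONDITION & SPEC =====
def Spec_meets_constraints (digits : List Int) (debug : Bool) (out : Bool) : Prop := out = meets_constraints_alt digits debug
instance (digits : List Int) (debug : Bool) (out : Bool) : Decidable (Spec_meets_constraints digits debug out) := by unfold Spec_meets_constraints; infer_instance

-- ===== CLAIM (what is proved, stated in full; the proofs are below) =====
def Claim_equal_meets_constraints : Prop := ∀ (digits : List Int) (debug : Bool), Dom_meets_constraints digits debug → Spec_meets_constraints digits debug (meets_constraints digits debug)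

-- ===== LEMMAS AND PROOFS =====
theorem mcLoopA_eq_all_prefix : ∀ (ds : List Int) (acc pw : Int) (k : Nat),
    mcLoopA ds acc pw ((k : Int) + 1) =
      (List.range ds.length).all
        (fun i => PySem.Int.mod (mcPrefixValue (ds.take (i + 1)) acc) ((k : Int) + (i : Int) + 1) == 0) := by
  intro ds
  induction ds with
  | nil => intro acc pw k; simp [mcLoopA]
  | cons d rest ih =>
    intro acc pw k
    simp only [mcLoopA, List.length_cons, List.range_succ_eq_map, List.all_cons, List.all_map,
      Function.comp_def, List.take_succ_cons, List.take_zero, mcPrefixValue, Nat.cast_zero,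
      add_zero]
    by_cases hm : PySem.Int.mod (acc * 10 + d) ((k : Int) + 1) = 0
    · rw [if_neg (not_not_intro hm)]
      have ih' := ih (acc * 10 + d) (pw + 1) (k + 1)
      push_cast at ih'
      have hdv : ∀ i : Nat, ((k : Int) + 1 + (i : Int) + 1) = (k : Int) + ((i : Int) + 1) + 1 := by
        intro i; ring
      simp only [hdv] at ih'
      rw [ih', hm]
      simp
    · rw [if_pos hm]
      have hfalse : (PySem.Int.mod (acc * 10 + d) ((k : Int) + 1) == 0) = false := by
        rw [beq_eq_false_iff_ne]; exact hm
      rw [hfalse, Bool.false_and]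

-- ===== VERDICT (by name: the statement is the Claim_ definition above) =====
theorem meets_constraints_spec : Claim_equal_meets_constraints := by
  intro digits debug _
  unfold Spec_meets_constraints meets_constraints meets_constraints_alt
  have hA := mcLoopA_eq_all_prefix digits 0 0 0
  norm_num at hA
  rw [hA, PySem.List.pyRange_one]
  simp only [show ((digits.length : Int) + 1 - 1) = ((digits.length : Nat) : Int) by ring,
      Int.toNat_natCast, List.all_map, Function.comp_def]
  refine congrArg (List.all (List.range digits.length)) ?_
  funext j
  have hs : PySem.List.slice digits none (some ((1 : Int) + (j : Int))) = digits.take (j + 1) := by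
    rw [show (1 : Int) + (j : Int) = ((j + 1 : Nat) : Int) by push_cast; ring,
        PySem.List.slice_to_natCast]
  have hpos : (0 : Int) < 1 + (j : Int) := by positivity
  rw [hs, PySem.Int.mod_eq_emod_of_pos hpos, show (1 : Int) + (j : Int) = (j : Int) + 1 by ring]
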